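-- pv_equiv track=rewrite | github.com/wisehero/programmers | level2/짝지어제거하기.py | solution
-- ===== SOURCE A (Python) =====
-- from collections import deque
--
-- def solution(s):
--     s = deque(list(s))
--     arr = []
--
--     while s:
--         if arr:
--             sp = s.popleft()
--             if sp == arr[-1]:
--                 arr.pop()
--             else:
--                 arr.append(sp)
--         else:
--             arr.append(s.popleft())
--
--     if len(s) == 0 and len(arr) == 0:
--         return 1
--     else:
--         return 0
-- ===== SOURCE B (Python) =====
-- def solution(s):
--     prev = None
--     while s != prev:
--         prev = s
--         out = []
--         i = 0
--         while i < len(s):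
--             if i + 1 < len(s) and s[i] == s[i + 1]:
--                 i += 2
--             else:
--                 out.append(s[i])
--                 i += 1
--         s = ''.join(out)
--     return 1 if s == '' else 0
-- ===== Notes on version B (the rewrite author's own statement) =====
-- stated objective: alternative
-- what changed: Replaces the one-pass deque+stack cancellation with repeated left-to-right passes that delete every non-overlapping adjacent equal pair, iterated to a fixpoint, then tests emptiness.
import Mathlib
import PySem

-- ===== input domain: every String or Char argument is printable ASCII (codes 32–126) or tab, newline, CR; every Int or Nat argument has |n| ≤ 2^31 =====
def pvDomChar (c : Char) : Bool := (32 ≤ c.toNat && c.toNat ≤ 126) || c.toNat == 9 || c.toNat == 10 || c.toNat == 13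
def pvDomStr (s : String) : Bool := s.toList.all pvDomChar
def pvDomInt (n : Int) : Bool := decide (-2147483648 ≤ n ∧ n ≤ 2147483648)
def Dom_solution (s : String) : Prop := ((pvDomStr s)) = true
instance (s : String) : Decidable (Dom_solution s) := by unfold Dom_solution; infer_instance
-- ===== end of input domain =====

-- B replaces A's one-pass stack cancellation by repeated pair-deleting passes to a fixpoint (alternative algorithm, same return value).


-- ===== PORT A =====
-- A's while loop over the deque; arr is Python's list (append/pop at the END, arr[-1] = getLast?)
def loopA : List Char → List Char → List Char
  | [], arr => arr
  | sp :: rest, arr =>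
    if arr ≠ [] then
      if arr.getLast? = some sp then loopA rest arr.dropLast
      else loopA rest (arr ++ [sp])
    else loopA rest (arr ++ [sp])

def solution (s : String) : Int :=
  let arr := loopA s.toList []
  -- after the while loop the deque is empty, so Python's `len(s) == 0` conjunct holds
  if arr.length = 0 then 1 else 0

-- ===== PORT B =====
-- one left-to-right pass of B's inner while loop: skip each non-overlapping adjacent equal pair
def passB : List Char → List Char
  | x :: y :: t => if x = y then passB t else x :: passB (y :: t)
  | l => l

-- needed for fixB's termination
theorem passB_sublist : ∀ l : List Char, List.Sublist (passB l) l := by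
  intro l
  induction l using passB.induct with
  | case1 y t ih =>
    simpa [passB] using ih.trans ((List.sublist_cons_self _ _).trans (List.sublist_cons_self _ _))
  | case2 x y t h ih => simpa [passB, h] using ih.cons₂ x
  | case3 l h =>
    have : passB l = l := by
      match l, h with
      | [], _ => rfl
      | [a], _ => rfl
      | a :: b :: t, h => exact absurd rfl (h a b t)
    rw [this]

-- B's outer while loop: repeat the pass until the string stops changing
def fixB (l : List Char) : List Char :=
  let t := passB l
  if h : t = l then t else fixB t
termination_by l.length
decreasing_by
  have hs := passB_sublist l
  rcases hs.length_le.lt_or_eq with hlt | heq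
  · exact hlt
  · exact absurd (hs.eq_of_length heq) h

def solution_alt (s : String) : Int :=
  if fixB s.toList = [] then 1 else 0

-- ===== PRECONDITION & SPEC =====
def Spec_solution (s : String) (out : Int) : Prop := out = solution_alt s
instance (s : String) (out : Int) : Decidable (Spec_solution s out) := by unfold Spec_solution; infer_instance

-- ===== CLAIM (what is proved, stated in full; the proofs are below) =====
def Claim_equal_solution : Prop := ∀ (s : String), Dom_solution s → Spec_solution s (solution s)

-- ===== LEMMAS AND PROOFS =====

-- A's stack with its top at the HEAD (loopA's arr, reversed)
def stepS (st : List Char) (c : Char) : List Char :=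
  match st with
  | [] => [c]
  | t :: r => if c = t then r else c :: t :: r

def runS (st : List Char) (l : List Char) : List Char := l.foldl stepS st

theorem runS_nil (st : List Char) : runS st [] = st := rfl

theorem runS_cons (st : List Char) (c : Char) (l : List Char) :
    runS st (c :: l) = runS (stepS st c) l := rfl

theorem loopA_eq_runS : ∀ (l arr : List Char), loopA l arr = (runS arr.reverse l).reverse := by
  intro l
  induction l with
  | nil => intro arr; simp [loopA, runS_nil]
  | cons sp rest ih =>
    intro arr
    by_cases h : arr = []
    · subst h
      simp only [loopA, ne_eq, not_true_eq_false, if_false, List.nil_append]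
      rw [ih]
      simp [runS_cons, stepS]
    · obtain ⟨a, t, ht⟩ := List.exists_cons_of_ne_nil (show arr.reverse ≠ [] by simpa)
      have hlast : arr.getLast? = some a := by
        rw [← List.head?_reverse, ht]; rfl
      by_cases hc : a = sp
      · subst hc
        simp only [loopA, ne_eq, h, not_false_eq_true, if_true, hlast, if_pos rfl]
        rw [ih]
        have hdl : arr.dropLast.reverse = t := by
          rw [← List.tail_reverse, ht]; rfl
        rw [hdl, runS_cons, ht]
        simp [stepS]
      · have hne : ¬ arr.getLast? = some sp := by
          rw [hlast]; exact fun e => hc (Option.some.inj e)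
        simp only [loopA, ne_eq, h, not_false_eq_true, if_true, hne, if_false]
        rw [ih, runS_cons, ht]
        have : stepS (a :: t) sp = sp :: a :: t := by
          simp [stepS, Ne.symm hc]
        rw [this]
        simp [ht]

theorem stepS_chain {st : List Char} (h : List.IsChain (· ≠ ·) st) (c : Char) :
    List.IsChain (· ≠ ·) (stepS st c) := by
  match st with
  | [] => simpa [stepS] using List.IsChain.singleton c
  | t :: r =>
    simp only [stepS]
    by_cases hc : c = t
    · simpa [hc] using h.tail
    · simpa [hc] using List.isChain_cons_cons.mpr ⟨hc, h⟩

theorem runS_pair {st : List Char} (h : List.IsChain (· ≠ ·) st) (x : Char) (l : List Char) :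
    runS st (x :: x :: l) = runS st l := by
  have key : stepS (stepS st x) x = st := by
    match st with
    | [] => simp [stepS]
    | t :: r =>
      by_cases hx : x = t
      · subst hx
        match r with
        | [] => simp [stepS]
        | z :: r2 =>
          have hxz : x ≠ z := (List.isChain_cons_cons.mp h).1
          simp [stepS, hxz]
      · simp [stepS, hx]
  rw [runS_cons, runS_cons, key]

theorem runS_passB : ∀ l : List Char, ∀ st, List.IsChain (· ≠ ·) st →
    runS st (passB l) = runS st l := by
  intro l
  induction l using passB.induct with
  | case1 y t ih =>
    intro st hst
    rw [passB, if_pos rfl, ih st hst, runS_pair hst]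
  | case2 x y t h ih =>
    intro st hst
    rw [passB, if_neg h, runS_cons, runS_cons, ih (stepS st x) (stepS_chain hst x)]
  | case3 l h =>
    intro st _
    have : passB l = l := by
      match l, h with
      | [], _ => rfl
      | [a], _ => rfl
      | a :: b :: t, h => exact absurd rfl (h a b t)
    rw [this]

theorem runS_fixB : ∀ l : List Char, ∀ st, List.IsChain (· ≠ ·) st →
    runS st (fixB l) = runS st l := by
  intro l
  induction l using fixB.induct with
  | case1 l t ht =>
    intro st hst
    have hfx : fixB l = l := by rw [fixB, dif_pos (show passB l = l from ht)]; exact ht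
    rw [hfx]
  | case2 l t ht ih =>
    intro st hst
    have hfx : fixB l = fixB (passB l) := by rw [fixB, dif_neg (show ¬ passB l = l from ht)]
    rw [hfx, ih st hst, runS_passB l st hst]

theorem passB_fix_chain : ∀ l : List Char, passB l = l → List.IsChain (· ≠ ·) l := by
  intro l
  induction l using passB.induct with
  | case1 y t ih =>
    intro he
    rw [passB, if_pos rfl] at he
    have hlen : (passB t).length ≤ t.length := (passB_sublist t).length_le
    rw [he] at hlen
    simp at hlen
  | case2 x y t h ih =>
    intro he
    rw [passB, if_neg h] at he
    have htail : passB (y :: t) = y :: t := by injection he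
    exact List.isChain_cons_cons.mpr ⟨h, ih htail⟩
  | case3 l h =>
    intro _
    match l, h with
    | [], _ => exact List.IsChain.nil
    | [a], _ => exact List.IsChain.singleton a
    | a :: b :: t, h => exact absurd rfl (h a b t)

theorem fixB_chain : ∀ l : List Char, List.IsChain (· ≠ ·) (fixB l) := by
  intro l
  induction l using fixB.induct with
  | case1 l t ht =>
    have hfx : fixB l = l := by rw [fixB, dif_pos (show passB l = l from ht)]; exact ht
    rw [hfx]
    exact passB_fix_chain l ht
  | case2 l t ht ih =>
    have hfx : fixB l = fixB (passB l) := by rw [fixB, dif_neg (show ¬ passB l = l from ht)]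
    rw [hfx]
    exact ih

theorem runS_irred_aux : ∀ (l : List Char) (c : Char) (st : List Char),
    List.IsChain (· ≠ ·) (c :: l) → runS (c :: st) l = l.reverse ++ c :: st := by
  intro l
  induction l with
  | nil => intro c st _; simp [runS_nil]
  | cons d t ih =>
    intro c st h
    have hcd : c ≠ d := (List.isChain_cons_cons.mp h).1
    have hdt : List.IsChain (· ≠ ·) (d :: t) := (List.isChain_cons_cons.mp h).2
    rw [runS_cons]
    have : stepS (c :: st) d = d :: c :: st := by
      simp [stepS, Ne.symm hcd]
    rw [this, ih d (c :: st) hdt]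
    simp

theorem runS_irred (l : List Char) (h : List.IsChain (· ≠ ·) l) : runS [] l = l.reverse := by
  match l with
  | [] => rfl
  | c :: t =>
    rw [runS_cons]
    have : stepS [] c = [c] := rfl
    rw [this, runS_irred_aux t c [] h]
    simp

-- ===== VERDICT (by name: the statement is the Claim_ definition above) =====
theorem solution_spec : Claim_equal_solution := by
  intro s _
  unfold Spec_solution solution solution_alt
  have h1 : loopA s.toList [] = (runS [] s.toList).reverse := by
    simpa using loopA_eq_runS s.toList []
  have h2 : runS [] (fixB s.toList) = runS [] s.toList :=
    runS_fixB s.toList [] List.IsChain.nil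
  have h3 : runS [] (fixB s.toList) = (fixB s.toList).reverse :=
    runS_irred _ (fixB_chain s.toList)
  have harr : loopA s.toList [] = fixB s.toList := by
    rw [h1, ← h2, h3, List.reverse_reverse]
  simp only [harr, List.length_eq_zero_iff]
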